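-- pv_equiv track=rewrite | github.com/Rumid98/PS_History | Baekjoon/Silver/1439_뒤집기.py | find
-- ===== SOURCE A (Python) =====
-- def find(s):  # c: 찾고자 하는 char, s: 입력받은 문자열
--     start_c = s[0]
--     idx = 0
--     result = 0
--     while idx != len(s):
--         if s[idx] == start_c:  # 찾고자 하는 값이면
--             idx += 1
--         else:  # 다른 값이면
--             while idx != len(s) and s[idx] != start_c:
--                 idx += 1  # index는 계속 증가
--             result += 1
--     return result
-- ===== SOURCE B (Python) =====
-- def find(s):
--     start_c = s[0]
--     return sum(1 for prev, ch in zip(start_c + s, s) if prev == start_c and ch != start_c)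
-- ===== Notes on version B (the rewrite author's own statement) =====
-- stated objective: idiomatic
-- what changed: Replaces the index-driven nested run-skipping while-loops with a single pairwise zip scan (a generator expression over zip(start_c+s, s)) counting the starts of maximal blocks differing from the first character; the C-level iteration also makes it measurably faster.
import Mathlib
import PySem

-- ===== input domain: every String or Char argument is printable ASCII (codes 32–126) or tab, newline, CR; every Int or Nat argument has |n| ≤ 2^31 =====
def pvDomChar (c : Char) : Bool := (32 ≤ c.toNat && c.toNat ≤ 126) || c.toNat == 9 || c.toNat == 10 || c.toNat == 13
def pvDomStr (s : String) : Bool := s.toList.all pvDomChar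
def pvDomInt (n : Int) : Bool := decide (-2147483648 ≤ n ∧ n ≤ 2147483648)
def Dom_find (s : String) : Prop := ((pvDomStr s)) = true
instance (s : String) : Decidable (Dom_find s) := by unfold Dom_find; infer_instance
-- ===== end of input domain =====

-- B replaces A's index-driven nested run-skipping while-loops with a single pairwise
-- zip scan counting block starts (idiomatic; same behaviour, both raise on "").


-- ===== PORT A =====
-- outer while over the remaining suffix: equal char → step; else inner while skips the
-- whole differing run (dropWhile) and result += 1
def findLoopA (c : Char) (l : List Char) : Int :=
  match l with
  | [] => 0
  | x :: rest =>
    if x = c then findLoopA c rest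
    else findLoopA c (rest.dropWhile (fun y => y ≠ c)) + 1
termination_by l.length
decreasing_by
  · simp
  · exact Nat.lt_succ_of_le (List.length_dropWhile_le _ _)

def find (s : String) : Int :=
  match PySem.Str.pyGet? s 0 with
  | none => 0            -- s[0] raises IndexError on ""; excluded by Pre_find
  | some c => findLoopA c s.toList

-- ===== PORT B =====
-- zip(start_c + s, s): (start_c + s).toList = c :: s.toList, exact on all strings
def find_alt (s : String) : Int :=
  match PySem.Str.pyGet? s 0 with
  | none => 0            -- s[0] raises IndexError on ""; excluded by Pre_find
  | some c =>
    (((c :: s.toList).zip s.toList).countP (fun p => p.1 == c && p.2 != c) : Int)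

-- ===== PRECONDITION & SPEC =====
-- Pre_ excludes only the empty string, on which A raises IndexError at s[0].
def Pre_find (s : String) : Prop := s ≠ ""
instance (s : String) : Decidable (Pre_find s) := by unfold Pre_find; infer_instance
def pvWitness_find : String := "aababb"

def Spec_find (s : String) (out : Int) : Prop := out = find_alt s
instance (s : String) (out : Int) : Decidable (Spec_find s out) := by unfold Spec_find; infer_instance

-- ===== CLAIM (what is proved, stated in full; the proofs are below) =====
def Claim_equal_find : Prop := ∀ (s : String), Dom_find s → Pre_find s → Spec_find s (find s)

-- ===== LEMMAS AND PROOFS =====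

-- combined invariant: P1 (previous char was c) and P2 (previous char was not c)
theorem findLoopA_nil (c : Char) : findLoopA c [] = 0 := by
  rw [findLoopA]

theorem findLoopA_cons_eq (c : Char) (xs : List Char) :
    findLoopA c (c :: xs) = findLoopA c xs := by
  rw [findLoopA]; simp

theorem findLoopA_cons_ne {c x : Char} (xs : List Char) (hx : x ≠ c) :
    findLoopA c (x :: xs) = findLoopA c (xs.dropWhile (fun y => y ≠ c)) + 1 := by
  rw [findLoopA]; simp [hx]

theorem zip_count_eq (c : Char) : ∀ n (l : List Char), l.length ≤ n →
    ((((c :: l).zip l).countP (fun p => p.1 == c && p.2 != c) : Int) = findLoopA c l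
     ∧ ∀ prev, prev ≠ c →
        ((((prev :: l).zip l).countP (fun p => p.1 == c && p.2 != c) : Int)
          = findLoopA c (l.dropWhile (fun y => y ≠ c)))) := by
  intro n
  induction n with
  | zero =>
    intro l hl
    have : l = [] := List.eq_nil_of_length_eq_zero (Nat.le_zero.mp hl)
    subst this
    exact ⟨by simp [findLoopA_nil], fun prev _ => by simp [findLoopA_nil]⟩
  | succ n ih =>
    intro l hl
    match l with
    | [] =>
      exact ⟨by simp [findLoopA_nil], fun prev _ => by simp [findLoopA_nil]⟩
    | x :: xs =>
      have hxs : xs.length ≤ n := by simpa using hl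
      constructor
      · -- P1: previous char = c
        by_cases hx : x = c
        · subst hx
          simp only [List.zip_cons_cons, List.countP_cons, findLoopA_cons_eq]
          simp [(ih xs hxs).1]
        · simp only [List.zip_cons_cons, List.countP_cons, findLoopA_cons_ne xs hx]
          have := (ih xs hxs).2 x hx
          simp [hx, this]
      · -- P2: previous char ≠ c
        intro prev hprev
        simp only [List.zip_cons_cons, List.countP_cons]
        by_cases hx : x = c
        · subst hx
          -- dropWhile stops at x = c; findLoopA eats the leading c
          rw [List.dropWhile_cons_of_neg (by simp), findLoopA_cons_eq]
          simp [(ih xs hxs).1]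
        · rw [List.dropWhile_cons_of_pos (by simp [hx])]
          have := (ih xs hxs).2 x hx
          simp [hprev, hx, this]

theorem toList_ne_nil {s : String} (h : s ≠ "") : s.toList ≠ [] := by
  intro hnil
  have := congrArg String.ofList hnil
  rw [String.ofList_toList] at this
  exact h (by simpa using this)

-- ===== VERDICT (by name: the statement is the Claim_ definition above) =====
theorem find_spec : Claim_equal_find := by
  intro s _ hpre
  unfold Spec_find find find_alt
  have hne := toList_ne_nil hpre
  match hl : s.toList with
  | [] => exact absurd hl hne
  | x :: xs =>
    have hget : PySem.Str.pyGet? s 0 = some x := by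
      simp only [PySem.Str.pyGet?_eq, PySem.Chars.pyGet?_eq_listPyGet?, hl,
        PySem.List.pyGet?_zero_cons]
    rw [hget]
    exact ((zip_count_eq x (x :: xs).length (x :: xs) le_rfl).1).symm
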